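-- pv_equiv track=rewrite | github.com/heungson/dep-parser-ko | bin/neuronlp2/io/conllx_stacked_data.py | _obtain_child_index_for_inside_out
-- ===== SOURCE A (Python) =====
-- def _obtain_child_index_for_inside_out(heads):
--     child_ids = [[] for _ in range(len(heads))]
--     for head in range(len(heads)):
--         # first find left children inside-out
--         for child in reversed(range(1, head)):
--             if heads[child] == head:
--                 child_ids[head].append(child)
--         # second find right children inside-out
--         for child in range(head + 1, len(heads)):
--             if heads[child] == head:
--                 child_ids[head].append(child)
--     return child_ids
-- ===== SOURCE B (Python) =====
-- def _obtain_child_index_for_inside_out(heads):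
--     n = len(heads)
--     left = [[] for _ in range(n)]
--     right = [[] for _ in range(n)]
--     for c in range(n - 1, 0, -1):
--         h = heads[c]
--         if 0 <= h < n and c < h:
--             left[h].append(c)
--     for c in range(1, n):
--         h = heads[c]
--         if 0 <= h < n and h < c:
--             right[h].append(c)
--     return [l + r for l, r in zip(left, right)]
-- ===== Notes on version B (the rewrite author's own statement) =====
-- stated objective: faster
-- what changed: Instead of scanning the whole sentence once per head (nested loops), B makes one descending and one ascending linear pass over the children, bucketing each child into left/right lists of its head, then concatenates the buckets.
import Mathlib
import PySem

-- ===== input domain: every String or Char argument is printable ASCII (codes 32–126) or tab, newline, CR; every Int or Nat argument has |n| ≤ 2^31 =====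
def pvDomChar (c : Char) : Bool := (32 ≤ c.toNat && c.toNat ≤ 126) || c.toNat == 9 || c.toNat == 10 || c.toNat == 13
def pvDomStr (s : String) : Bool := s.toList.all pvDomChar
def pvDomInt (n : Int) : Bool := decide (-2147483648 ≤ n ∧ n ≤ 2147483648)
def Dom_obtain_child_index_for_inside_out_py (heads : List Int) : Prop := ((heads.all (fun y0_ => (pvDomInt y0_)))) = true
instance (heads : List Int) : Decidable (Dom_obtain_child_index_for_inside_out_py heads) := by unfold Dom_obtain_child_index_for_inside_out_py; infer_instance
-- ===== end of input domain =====

-- B replaces A's O(n^2) head-by-head scans with two linear bucketing passes over the children (objective: faster, asymptotic).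

-- ===== PORT A =====
-- A: for each head, scan reversed(range(1, head)) then range(head+1, n), appending matching children to child_ids[head].
-- heads[child] is read with List.getD (exact: every index visited is in range 0 ≤ child < heads.length).
def obtain_child_index_for_inside_out_py (heads : List Int) : List (List Int) :=
  let n := heads.length
  let child_ids := (List.range n).map (fun _ => ([] : List Int))
  (List.range n).foldl
    (fun cids head =>
      let cids := ((List.range' 1 (head - 1)).reverse).foldl
        (fun cids child =>
          if heads.getD child 0 = (head : Int) then cids.modify head (· ++ [(child : Int)]) else cids)
        cids
      (List.range' (head + 1) (n - (head + 1))).foldl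
        (fun cids child =>
          if heads.getD child 0 = (head : Int) then cids.modify head (· ++ [(child : Int)]) else cids)
        cids)
    child_ids

-- ===== PORT B =====
-- B: one descending pass bucketing left children, one ascending pass bucketing right children, then zip with ++.
def obtain_child_index_for_inside_out_py_alt (heads : List Int) : List (List Int) :=
  let n := heads.length
  let left := ((List.range' 1 (n - 1)).reverse).foldl
    (fun acc c =>
      let h := heads.getD c 0
      if 0 ≤ h ∧ h < (n : Int) ∧ (c : Int) < h then acc.modify h.toNat (· ++ [(c : Int)]) else acc)
    ((List.range n).map (fun _ => ([] : List Int)))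
  let right := (List.range' 1 (n - 1)).foldl
    (fun acc c =>
      let h := heads.getD c 0
      if 0 ≤ h ∧ h < (n : Int) ∧ h < (c : Int) then acc.modify h.toNat (· ++ [(c : Int)]) else acc)
    ((List.range n).map (fun _ => ([] : List Int)))
  List.zipWith (· ++ ·) left right

-- ===== PRECONDITION & SPEC =====
def Spec_obtain_child_index_for_inside_out_py (heads : List Int) (out : List (List Int)) : Prop := out = obtain_child_index_for_inside_out_py_alt heads
instance (heads : List Int) (out : List (List Int)) : Decidable (Spec_obtain_child_index_for_inside_out_py heads out) := by unfold Spec_obtain_child_index_for_inside_out_py; infer_instance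

-- ===== CLAIM (what is proved, stated in full; the proofs are below) =====
def Claim_equal_obtain_child_index_for_inside_out_py : Prop := ∀ (heads : List Int), Dom_obtain_child_index_for_inside_out_py heads → Spec_obtain_child_index_for_inside_out_py heads (obtain_child_index_for_inside_out_py heads)

-- ===== LEMMAS AND PROOFS =====

-- the common spec: bucket j = left children of j inside-out ++ right children of j inside-out
def pvBucket (heads : List Int) (j : Nat) : List Int :=
  (((List.range' 1 (j - 1)).reverse).filter (fun c => decide (heads.getD c 0 = (j : Int)))).map (fun c => (c : Int))
  ++ ((List.range' (j + 1) (heads.length - (j + 1))).filter (fun c => decide (heads.getD c 0 = (j : Int)))).map (fun c => (c : Int))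

-- a guarded-modify fold, read back pointwise
lemma foldl_modify_getElem? (cs : List Nat) (P : Nat → Prop) [DecidablePred P] (idx : Nat → Nat)
    (acc : List (List Int)) (j : Nat) :
    (cs.foldl (fun a c => if P c then a.modify (idx c) (· ++ [(c : Int)]) else a) acc)[j]? =
      acc[j]?.map (· ++ (cs.filter (fun c => decide (P c ∧ idx c = j))).map (fun c => (c : Int))) := by
  induction cs generalizing acc with
  | nil => simp
  | cons c cs ih =>
    simp only [List.foldl_cons, List.filter_cons]
    by_cases hp : P c
    · by_cases hj : idx c = j
      · rw [ih]
        simp [hp, hj, Option.map_map, Function.comp_def, List.append_assoc]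
      · rw [ih]
        simp [hp, hj]
    · rw [ih]; simp [hp]

-- fold of a step that appends to exactly one bucket per index
lemma foldl_range'_getElem? (g : Nat → List Int) (step : List (List Int) → Nat → List (List Int))
    (hstep : ∀ acc h j, (step acc h)[j]? = if j = h then acc[j]?.map (· ++ g h) else acc[j]?)
    (a k : Nat) (acc : List (List Int)) (j : Nat) :
    ((List.range' a k).foldl step acc)[j]? =
      if a ≤ j ∧ j < a + k then acc[j]?.map (· ++ g j) else acc[j]? := by
  induction k generalizing a acc with
  | zero => simp
  | succ k ih =>
    rw [List.range'_succ, List.foldl_cons, ih, hstep]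
    by_cases hja : j = a
    · subst hja
      simp
    · simp [hja]
      split_ifs <;> first | rfl | omega

-- B-side per-bucket results of the two bucketing passes
def pvLeftB (heads : List Int) (j : Nat) : List Int :=
  (((List.range' 1 (heads.length - 1)).reverse).filter
    (fun c => decide ((0 ≤ heads.getD c 0 ∧ heads.getD c 0 < (heads.length : Int) ∧ (c : Int) < heads.getD c 0)
      ∧ (heads.getD c 0).toNat = j))).map (fun c => (c : Int))

def pvRightB (heads : List Int) (j : Nat) : List Int :=
  ((List.range' 1 (heads.length - 1)).filter
    (fun c => decide ((0 ≤ heads.getD c 0 ∧ heads.getD c 0 < (heads.length : Int) ∧ heads.getD c 0 < (c : Int))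
      ∧ (heads.getD c 0).toNat = j))).map (fun c => (c : Int))

lemma map_range'_getElem? (n i : Nat) (f : Nat → List Int) :
    ((List.range' 0 n).map f)[i]? = if i < n then some (f i) else none := by
  rcases lt_or_ge i n with h | h
  · rw [List.getElem?_map, List.getElem?_range' (by simpa using h)]
    simp [h]
  · rw [List.getElem?_eq_none (by simpa using h)]
    simp; omega

-- one iteration of A's outer loop appends pvBucket heads h to bucket h and touches nothing else
lemma stepA_getElem? (heads : List Int) (h : Nat) (acc : List (List Int)) (j : Nat) :
    ((List.range' (h + 1) (heads.length - (h + 1))).foldl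
        (fun cids child => if heads.getD child 0 = (h : Int) then cids.modify h (· ++ [(child : Int)]) else cids)
        (((List.range' 1 (h - 1)).reverse).foldl
          (fun cids child => if heads.getD child 0 = (h : Int) then cids.modify h (· ++ [(child : Int)]) else cids)
          acc))[j]?
      = if j = h then acc[j]?.map (· ++ pvBucket heads h) else acc[j]? := by
  rw [foldl_modify_getElem? _ (fun c => heads.getD c 0 = (h : Int)) (fun _ => h),
      foldl_modify_getElem? _ (fun c => heads.getD c 0 = (h : Int)) (fun _ => h)]
  by_cases hj : j = h
  · subst hj
    simp [pvBucket, Option.map_map, Function.comp_def, List.append_assoc]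
  · simp [hj, Ne.symm hj]

lemma A_getElem? (heads : List Int) (j : Nat) :
    (obtain_child_index_for_inside_out_py heads)[j]? =
      if j < heads.length then some (pvBucket heads j) else none := by
  simp only [obtain_child_index_for_inside_out_py]
  rw [List.range_eq_range']
  rw [foldl_range'_getElem? (pvBucket heads) _ (fun acc h j => stepA_getElem? heads h acc j)]
  rw [map_range'_getElem?]
  by_cases hj : j < heads.length
  · simp [hj]
  · simp [hj]

lemma B_getElem? (heads : List Int) (j : Nat) :
    (obtain_child_index_for_inside_out_py_alt heads)[j]? =
      if j < heads.length then some (pvLeftB heads j ++ pvRightB heads j) else none := by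
  simp only [obtain_child_index_for_inside_out_py_alt]
  simp only [List.getElem?_zipWith]
  rw [List.range_eq_range']
  rw [foldl_modify_getElem? _
        (fun c => 0 ≤ heads.getD c 0 ∧ heads.getD c 0 < (heads.length : Int) ∧ (c : Int) < heads.getD c 0)
        (fun c => (heads.getD c 0).toNat),
      foldl_modify_getElem? _
        (fun c => 0 ≤ heads.getD c 0 ∧ heads.getD c 0 < (heads.length : Int) ∧ heads.getD c 0 < (c : Int))
        (fun c => (heads.getD c 0).toNat)]
  rw [map_range'_getElem?]
  by_cases hj : j < heads.length
  · simp [hj, pvLeftB, pvRightB]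
  · simp [hj]

-- the left pass collects exactly A's left-children list for bucket j
lemma leftEq (heads : List Int) (j : Nat) (hj : j < heads.length) :
    pvLeftB heads j
      = (((List.range' 1 (j - 1)).reverse).filter (fun c => decide (heads.getD c 0 = (j : Int)))).map
          (fun c => (c : Int)) := by
  unfold pvLeftB
  rw [List.filter_reverse, List.filter_reverse]
  have key :
      (List.range' 1 (heads.length - 1)).filter
          (fun c => decide ((0 ≤ heads.getD c 0 ∧ heads.getD c 0 < (heads.length : Int) ∧ (c : Int) < heads.getD c 0)
            ∧ (heads.getD c 0).toNat = j))
        = (List.range' 1 (j - 1)).filter (fun c => decide (heads.getD c 0 = (j : Int))) := by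
    by_cases hj0 : j = 0
    · subst hj0
      simp only [Nat.zero_sub, List.range'_zero, List.filter_nil]
      rw [List.filter_eq_nil_iff]
      intro c hc
      rw [List.mem_range'_1] at hc
      simp only [decide_eq_true_eq]
      omega
    · have hsplit : List.range' 1 (j - 1) ++ List.range' j (heads.length - j)
          = List.range' 1 (heads.length - 1) := by
        have h1 : 1 + (j - 1) = j := by omega
        have h2 : (j - 1) + (heads.length - j) = heads.length - 1 := by omega
        rw [← h2, ← List.range'_append_1, h1]
      rw [← hsplit, List.filter_append]
      have hnil : (List.range' j (heads.length - j)).filter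
          (fun c => decide ((0 ≤ heads.getD c 0 ∧ heads.getD c 0 < (heads.length : Int) ∧ (c : Int) < heads.getD c 0)
            ∧ (heads.getD c 0).toNat = j)) = [] := by
        rw [List.filter_eq_nil_iff]
        intro c hc
        rw [List.mem_range'_1] at hc
        simp only [decide_eq_true_eq]
        omega
      rw [hnil, List.append_nil]
      apply List.filter_congr
      intro c hc
      rw [List.mem_range'_1] at hc
      simp only [decide_eq_decide]
      omega
  rw [key]

-- the right pass collects exactly A's right-children list for bucket j
lemma rightEq (heads : List Int) (j : Nat) (hj : j < heads.length) :
    pvRightB heads j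
      = ((List.range' (j + 1) (heads.length - (j + 1))).filter (fun c => decide (heads.getD c 0 = (j : Int)))).map
          (fun c => (c : Int)) := by
  unfold pvRightB
  have key :
      (List.range' 1 (heads.length - 1)).filter
          (fun c => decide ((0 ≤ heads.getD c 0 ∧ heads.getD c 0 < (heads.length : Int) ∧ heads.getD c 0 < (c : Int))
            ∧ (heads.getD c 0).toNat = j))
        = (List.range' (j + 1) (heads.length - (j + 1))).filter (fun c => decide (heads.getD c 0 = (j : Int))) := by
    have hsplit : List.range' 1 j ++ List.range' (j + 1) (heads.length - (j + 1))
        = List.range' 1 (heads.length - 1) := by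
      have h2 : j + (heads.length - (j + 1)) = heads.length - 1 := by omega
      have h1 : j + 1 = 1 + j := by omega
      rw [← h2, ← List.range'_append_1, h1]
    rw [← hsplit, List.filter_append]
    have hnil : (List.range' 1 j).filter
        (fun c => decide ((0 ≤ heads.getD c 0 ∧ heads.getD c 0 < (heads.length : Int) ∧ heads.getD c 0 < (c : Int))
          ∧ (heads.getD c 0).toNat = j)) = [] := by
      rw [List.filter_eq_nil_iff]
      intro c hc
      rw [List.mem_range'_1] at hc
      simp only [decide_eq_true_eq]
      omega
    rw [hnil, List.nil_append]
    apply List.filter_congr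
    intro c hc
    rw [List.mem_range'_1] at hc
    simp only [decide_eq_decide]
    omega
  rw [key]

lemma bucketEq (heads : List Int) (j : Nat) (hj : j < heads.length) :
    pvLeftB heads j ++ pvRightB heads j = pvBucket heads j := by
  rw [leftEq heads j hj, rightEq heads j hj, pvBucket]

-- ===== VERDICT (by name: the statement is the Claim_ definition above) =====
theorem obtain_child_index_for_inside_out_py_spec : Claim_equal_obtain_child_index_for_inside_out_py := by
  intro heads _
  unfold Spec_obtain_child_index_for_inside_out_py
  apply List.ext_getElem?
  intro i
  rw [A_getElem?, B_getElem?]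
  by_cases hi : i < heads.length
  · simp [hi, bucketEq heads i hi]
  · simp [hi]
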